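-- pv_equiv track=rewrite | github.com/SilicalNZ/canvas | canvas/common/line_thingy.py | find_fill_in
-- ===== SOURCE A (Python) =====
-- class RangeError(Exception):
--     pass
--
-- def padded(spacing: int, segments):
--     """
--     :param spacing: length of gaps
--     :param segments: length of each line
--
--
--     spacing = 1
--     segments = (3, 5, 4, 1, 2)
--     --- ----- ---- - --
--
--     :return: The position of where each segment is located
--     """
--     pos = 0
--     for line in segments:
--         yield pos
--         pos += line
--         pos += spacing
--
-- def fill_in_line(distance: int, segments):
--     """
--     :param distance: length of line to fill in
--     :param segments: length of each line
--
--     distance = 20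
--     segments = (3, 5, 4, 1, 2)
--     --- ----- ---- - --
--
--     :return: The position of where each segment is located
--     """
--     if sum(segments) > distance:
--         raise RangeError
--
--     spacing = distance - sum(segments)
--
--     if len(segments) == 1:
--         yield distance // 2
--         return
--
--     padding = divmod(spacing, len(segments) - 1)
--
--     halfway = distance / 2
--     for i in padded(padding[0], segments):
--         if i >= halfway:
--             i += padding[1]
--         yield i
--
-- def find_fill_in(distance: int, lines: int):
--     """
--     :param distance: length of line to fill in
--     :param line: The amount of lines to contain within distance
--
--     distance = 20
--     line = 8
--     --------- --------- --
--
--     :return: The position of where each segment is located, the length of the segment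
--     """
--     if distance - lines < 0:
--         raise RangeError
--
--     if lines == 1:
--         yield 0, distance
--         return
--
--     line_length, rm = divmod(distance, lines)
--     segments = [line_length for _ in range(lines)]
--     for x in range(rm):
--         segments[x] += 1
--
--     yield from zip(fill_in_line(distance, segments), segments)
-- ===== SOURCE B (Python) =====
-- class RangeError(Exception):
--     pass
--
-- def find_fill_in(distance: int, lines: int):
--     if distance - lines < 0:
--         raise RangeError
--
--     if lines == 1:
--         yield 0, distance
--         return
--
--     line_length, rm = divmod(distance, lines)
--     pos = 0
--     for x in range(lines):
--         length = line_length + (1 if x < rm else 0)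
--         yield pos, length
--         pos += length
-- ===== Notes on version B (the rewrite author's own statement) =====
-- stated objective: simpler
-- what changed: B replaces A's three-function generator pipeline (build a segments list, mutate its prefix, then thread it through fill_in_line/padded prefix-sum generators with a spacing/halfway correction that is provably a no-op here) by one single loop over range(lines) carrying the running position and emitting (pos, length) directly.
import Mathlib
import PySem

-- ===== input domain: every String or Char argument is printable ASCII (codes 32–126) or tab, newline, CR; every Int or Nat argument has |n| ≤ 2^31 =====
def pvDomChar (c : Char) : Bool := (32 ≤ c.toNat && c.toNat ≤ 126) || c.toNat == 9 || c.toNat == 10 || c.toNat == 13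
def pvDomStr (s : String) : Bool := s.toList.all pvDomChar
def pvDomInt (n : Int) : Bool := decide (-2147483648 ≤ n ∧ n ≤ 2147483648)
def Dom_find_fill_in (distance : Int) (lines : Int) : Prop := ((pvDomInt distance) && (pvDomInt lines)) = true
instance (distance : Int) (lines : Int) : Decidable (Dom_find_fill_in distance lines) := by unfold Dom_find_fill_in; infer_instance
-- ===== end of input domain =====

-- B fuses A's two-helper generator pipeline (build segments, then fill_in_line/padded prefix sums)
-- into one single loop carrying the running position; same values, simpler decomposition.


-- ===== PORT A =====

-- generator padded(spacing, segments): yields pos, then pos += line; pos += spacing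
def paddedPort (spacing : Int) (segments : List Int) : List Int :=
  (segments.foldl (fun (st : Int × List Int) line =>
      (st.1 + line + spacing, st.2 ++ [st.1])) (0, [])).2

-- generator fill_in_line(distance, segments)
def fillInLinePort (distance : Int) (segments : List Int) : List Int :=
  if segments.sum > distance then []   -- raise RangeError (excluded by Pre_)
  else
    let spacing := distance - segments.sum
    if segments.length = 1 then [PySem.Int.floordiv distance 2]
    else
      match PySem.Int.divmod? spacing ((segments.length : Int) - 1) with
      | none => []                     -- ZeroDivisionError (excluded by Pre_)
      | some padding =>
        -- Python compares int i with float halfway = distance/2; on |distance| ≤ 2^31 this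
        -- float is exact, so 'i >= distance/2' is exactly '2*i ≥ distance'.
        (paddedPort padding.1 segments).map
          (fun i => if 2 * i ≥ distance then i + padding.2 else i)

def find_fill_in (distance : Int) (lines : Int) : List (Int × Int) :=
  if distance - lines < 0 then []      -- raise RangeError (excluded by Pre_)
  else if lines = 1 then [(0, distance)]
  else
    match PySem.Int.divmod? distance lines with
    | none => []                       -- ZeroDivisionError (lines == 0; excluded by Pre_)
    | some qr =>
      let segments0 := (PySem.List.pyRange 0 lines 1).map (fun _ => qr.1)
      -- for x in range(rm): segments[x] += 1
      let segments := (PySem.List.pyRange 0 qr.2 1).foldl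
          (fun s x => PySem.List.pySetD s x (PySem.List.pyGetD s x 0 + 1)) segments0
      (fillInLinePort distance segments).zip segments

-- ===== PORT B =====
def find_fill_in_alt (distance : Int) (lines : Int) : List (Int × Int) :=
  if distance - lines < 0 then []      -- raise RangeError (excluded by Pre_)
  else if lines = 1 then [(0, distance)]
  else
    match PySem.Int.divmod? distance lines with
    | none => []                       -- ZeroDivisionError (lines == 0; excluded by Pre_)
    | some qr =>
      ((PySem.List.pyRange 0 lines 1).foldl
        (fun (st : Int × List (Int × Int)) x =>
          (st.1 + (qr.1 + (if x < qr.2 then 1 else 0)),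
           st.2 ++ [(st.1, qr.1 + (if x < qr.2 then 1 else 0))]))
        (0, [])).2

-- ===== PRECONDITION & SPEC =====
-- Pre_ excludes exactly the inputs where A raises: distance - lines < 0 (RangeError),
-- lines = 0 (ZeroDivisionError), and distance < 0 with lines < 0 (RangeError inside fill_in_line).
def Pre_find_fill_in (distance : Int) (lines : Int) : Prop :=
  lines ≠ 0 ∧ 0 ≤ distance - lines ∧ 0 ≤ distance
instance (distance : Int) (lines : Int) : Decidable (Pre_find_fill_in distance lines) := by
  unfold Pre_find_fill_in; infer_instance

def pvWitness_find_fill_in : Int × Int := (20, 8)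

def Spec_find_fill_in (distance : Int) (lines : Int) (out : List (Int × Int)) : Prop :=
  out = find_fill_in_alt distance lines
instance (distance : Int) (lines : Int) (out : List (Int × Int)) :
    Decidable (Spec_find_fill_in distance lines out) := by unfold Spec_find_fill_in; infer_instance

-- ===== CLAIM (what is proved, stated in full; the proofs are below) =====
def Claim_equal_find_fill_in : Prop := ∀ (distance : Int) (lines : Int), Dom_find_fill_in distance lines → Pre_find_fill_in distance lines → Spec_find_fill_in distance lines (find_fill_in distance lines)


-- ===== LEMMAS AND PROOFS =====

-- segment length at index x when the first r segments get one extra unit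
def segF (q r x : Int) : Int := q + (if x < r then 1 else 0)

-- (position, length) pairs for consecutive segments starting at position p
def gpairs (p : Int) : List Int → List (Int × Int)
  | [] => []
  | len :: rest => (p, len) :: gpairs (p + len) rest

theorem gpairs_zip (segs : List Int) : ∀ p : Int,
    ((gpairs p segs).map Prod.fst).zip segs = gpairs p segs := by
  induction segs with
  | nil => intro p; rfl
  | cons a t ih => intro p; simp [gpairs, ih]

theorem foldB (q r : Int) (xs : List Int) : ∀ (p : Int) (out : List (Int × Int)),
    (xs.foldl (fun (st : Int × List (Int × Int)) x =>
        (st.1 + (q + (if x < r then 1 else 0)),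
         st.2 ++ [(st.1, q + (if x < r then 1 else 0))])) (p, out)).2
    = out ++ gpairs p (xs.map (segF q r)) := by
  induction xs with
  | nil => intro p out; simp [gpairs]
  | cons a t ih => intro p out; simp [List.foldl_cons, ih, gpairs, segF]

theorem foldPadded (segs : List Int) : ∀ (p : Int) (out : List Int),
    (segs.foldl (fun (st : Int × List Int) line =>
        (st.1 + line, st.2 ++ [st.1])) (p, out)).2
    = out ++ (gpairs p segs).map Prod.fst := by
  induction segs with
  | nil => intro p out; simp [gpairs]
  | cons a t ih => intro p out; simp [List.foldl_cons, ih, gpairs]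

-- building the segments list: incrementing indices 0..j-1 of the all-q list
theorem segBuild (l q : Int) : ∀ (j : Nat), (j : Int) ≤ l →
    (PySem.List.pyRange 0 (j : Int) 1).foldl
        (fun s x => PySem.List.pySetD s x (PySem.List.pyGetD s x 0 + 1))
        ((PySem.List.pyRange 0 l 1).map (fun _ => q))
    = (PySem.List.pyRange 0 l 1).map (fun x => segF q (j : Int) x) := by
  intro j
  induction j with
  | zero =>
    intro _
    rw [show ((0 : Nat) : Int) = 0 by norm_num, PySem.List.pyRange_one_eq_nil (le_refl 0)]
    simp only [List.foldl_nil]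
    apply List.map_congr_left
    intro x hx
    rw [PySem.List.mem_pyRange_one] at hx
    simp [segF, show ¬ (x < 0) by omega]
  | succ j ih =>
    intro hj1
    have hj : (j : Int) ≤ l := by push_cast at hj1 ⊢; omega
    have hjl : (j : Int) < l := by push_cast at hj1; omega
    rw [show ((j + 1 : Nat) : Int) = (j : Int) + 1 by push_cast; ring,
        PySem.List.pyRange_one_succ_right (by positivity), List.foldl_append, ih hj]
    simp only [List.foldl_cons, List.foldl_nil]
    rw [PySem.List.pyGetD_map_pyRange_of_nonneg _ _ _ _ (by positivity) hjl,
        PySem.List.pySetD_of_nonneg _ _ (by positivity)]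
    have hget : segF q (j : Int) (j : Int) = q := by simp [segF]
    rw [hget]
    apply List.ext_getElem
    · simp
    · intro k hk1 hk2
      simp only [List.getElem_set, List.getElem_map, PySem.List.getElem_pyRange_one, zero_add,
        Int.toNat_natCast]
      by_cases hkj : j = k
      · subst hkj
        simp [segF]
      · rw [if_neg hkj]
        simp only [segF]
        split_ifs <;> omega

-- the segments sum: j segments, first min r j of them one longer
theorem segSum (q r : Int) (hr : 0 ≤ r) : ∀ (j : Nat),
    ((PySem.List.pyRange 0 (j : Int) 1).map (fun x => segF q r x)).sum
      = (j : Int) * q + min r (j : Int) := by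
  intro j
  induction j with
  | zero =>
    rw [show ((0 : Nat) : Int) = 0 by norm_num, PySem.List.pyRange_one_eq_nil (le_refl 0)]
    simp [min_eq_right hr]
  | succ j ih =>
    rw [show ((j + 1 : Nat) : Int) = (j : Int) + 1 by push_cast; ring,
        PySem.List.pyRange_one_succ_right (by positivity), List.map_append, List.sum_append, ih]
    simp only [List.map_cons, List.map_nil, List.sum_cons, List.sum_nil, segF]
    rw [add_one_mul]
    split_ifs <;> omega

-- ===== VERDICT (by name: the statement is the Claim_ definition above) =====
theorem find_fill_in_spec : Claim_equal_find_fill_in := by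
  intro distance lines _ hpre
  obtain ⟨hl0, hdl, hd0⟩ := hpre
  have hng : ¬ distance - lines < 0 := by omega
  unfold Spec_find_fill_in
  by_cases hl1 : lines = 1
  · simp [find_fill_in, find_fill_in_alt, hl1]
  · have hdm : PySem.Int.divmod? distance lines
        = some (PySem.Int.floordiv distance lines, PySem.Int.mod distance lines) := by
      simp [PySem.Int.divmod?, PySem.Int.floordiv, PySem.Int.mod, hl0]
    by_cases hlneg : lines < 0
    · -- negative lines (and 0 ≤ distance): both sides produce []
      have hrm : PySem.Int.mod distance lines ≤ 0 := by
        have h1 : PySem.Int.mod distance lines = -PySem.Int.mod (-distance) (-lines) := by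
          simpa using PySem.Int.mod_neg_neg (-distance) (-lines)
        have h2 : PySem.Int.mod (-distance) (-lines) = (-distance) % (-lines) :=
          PySem.Int.mod_eq_emod_of_pos (by omega)
        have h3 : 0 ≤ (-distance) % (-lines) := Int.emod_nonneg _ (by omega)
        omega
      have hlr : PySem.List.pyRange 0 lines 1 = [] :=
        PySem.List.pyRange_one_eq_nil (by omega)
      have hrg : PySem.List.pyRange 0 (PySem.Int.mod distance lines) 1 = [] :=
        PySem.List.pyRange_one_eq_nil hrm
      simp only [find_fill_in, find_fill_in_alt, hdm, if_neg hng, if_neg hl1, hlr, hrg,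
        List.map_nil, List.foldl_nil]
      simp [fillInLinePort, paddedPort, PySem.Int.divmod?,
        show ¬ (0 : Int) > distance by omega]
    · -- lines ≥ 2
      have hl2 : 2 ≤ lines := by omega
      set q := PySem.Int.floordiv distance lines with hq
      set r := PySem.Int.mod distance lines with hrdef
      have hmod : r = distance % lines := PySem.Int.mod_eq_emod_of_pos (by omega)
      have hr0 : 0 ≤ r := by rw [hmod]; exact Int.emod_nonneg _ (by omega)
      have hrl : r < lines := by rw [hmod]; exact Int.emod_lt_of_pos _ (by omega)
      have hsum : q * lines + r = distance := PySem.Int.floordiv_mul_add_mod distance lines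
      have hrcast : ((r.toNat : Nat) : Int) = r := Int.toNat_of_nonneg hr0
      have hlcast : ((lines.toNat : Nat) : Int) = lines := Int.toNat_of_nonneg (by omega)
      have hseg :
          (PySem.List.pyRange 0 r 1).foldl
              (fun s x => PySem.List.pySetD s x (PySem.List.pyGetD s x 0 + 1))
              ((PySem.List.pyRange 0 lines 1).map (fun _ => q))
          = (PySem.List.pyRange 0 lines 1).map (fun x => segF q r x) := by
        rw [← hrcast]
        exact segBuild lines q r.toNat (by omega)
      set segs := (PySem.List.pyRange 0 lines 1).map (fun x => segF q r x) with hsegs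
      have hsegsum : segs.sum = distance := by
        rw [hsegs, ← hlcast, segSum q r hr0 lines.toNat, hlcast,
          min_eq_left (le_of_lt hrl), mul_comm]
        omega
      have hlen : segs.length = lines.toNat := by
        simp [hsegs, PySem.List.length_pyRange_one]
      have hfill : fillInLinePort distance segs = (gpairs 0 segs).map Prod.fst := by
        unfold fillInLinePort
        rw [if_neg (show ¬ segs.sum > distance by omega), hsegsum, sub_self,
          if_neg (show ¬ segs.length = 1 by omega)]
        have hdm2 : PySem.Int.divmod? 0 ((segs.length : Int) - 1) = some (0, 0) := by
          simp [PySem.Int.divmod?, show ((segs.length : Int) - 1) ≠ 0 by omega,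
            Int.zero_fdiv, Int.zero_fmod]
        rw [hdm2]
        unfold paddedPort
        simp only [add_zero, ite_self]
        rw [foldPadded segs 0 []]
        simp
      simp only [find_fill_in, find_fill_in_alt, hdm, if_neg hng, if_neg hl1, hseg]
      rw [hfill, gpairs_zip, foldB q r (PySem.List.pyRange 0 lines 1) 0 []]
      simp [hsegs]
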